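-- pv_equiv track=rewrite | github.com/Kiyotakakirito/AURORA-FINAL | evaluation_engine/nlp_report_analyzer.py | _detect_sentence_fragments
-- ===== SOURCE A (Python) =====
-- from typing import Dict, List, Any, Optional, Tuple
--
-- def _detect_sentence_fragments(sentences: List[str]) -> int:
--     """Detect potential sentence fragments"""
--     fragments = 0
--
--     for sentence in sentences:
--         words = sentence.split()
--         if len(words) < 3:
--             fragments += 1
--         # Check if sentence lacks a verb (simplified)
--         elif not any(word.endswith(('ed', 'ing', 's', 'es')) or word in ['is', 'are', 'was', 'were', 'has', 'have', 'do', 'does'] for word in words[:10]):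
--             fragments += 0.5
--
--     return int(fragments)
-- ===== SOURCE B (Python) =====
-- def _is_short(sentence):
--     return len(sentence.split()) < 3
--
--
-- def _lacks_verb(sentence):
--     words = sentence.split()
--     return len(words) >= 3 and not any(
--         word.endswith(('ed', 'ing', 's', 'es'))
--         or word in ['is', 'are', 'was', 'were', 'has', 'have', 'do', 'does']
--         for word in words[:10]
--     )
--
--
-- def _detect_sentence_fragments(sentences):
--     short = sum(1 for s in sentences if _is_short(s))
--     half = sum(1 for s in sentences if _lacks_verb(s))
--     return short + half // 2
-- ===== Notes on version B (the rewrite author's own statement) =====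
-- stated objective: simpler
-- what changed: Replaces the float accumulator loop (fragments += 1 / += 0.5, then int()) by two integer counts over named predicates combined in the closed form short + half // 2.
import Mathlib
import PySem

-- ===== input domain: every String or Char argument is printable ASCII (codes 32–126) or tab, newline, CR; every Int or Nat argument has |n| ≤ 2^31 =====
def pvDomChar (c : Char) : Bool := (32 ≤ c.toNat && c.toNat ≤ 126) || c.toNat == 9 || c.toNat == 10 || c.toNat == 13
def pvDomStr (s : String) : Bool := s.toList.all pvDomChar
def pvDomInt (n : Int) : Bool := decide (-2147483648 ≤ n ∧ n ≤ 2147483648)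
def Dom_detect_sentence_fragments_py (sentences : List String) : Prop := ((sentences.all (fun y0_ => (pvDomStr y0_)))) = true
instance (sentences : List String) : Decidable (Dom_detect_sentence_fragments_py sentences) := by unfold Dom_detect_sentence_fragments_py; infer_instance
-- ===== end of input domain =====

-- B replaces A's float accumulator loop by two integer counts combined as short + half // 2 (objective: simpler).

-- ===== PORT A =====
-- A's `fragments` is a Python float that only ever grows by 1 or 0.5, so it is tracked
-- exactly in HALF-UNITS as an Int; the final `int(fragments)` (truncation of a
-- nonnegative value) is exactly floor division of the half-unit count by 2.
def detect_sentence_fragments_py (sentences : List String) : Int :=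
  let fragments2 : Int := sentences.foldl (fun acc sentence =>
    let words := PySem.Str.split₀ sentence
    if words.length < 3 then
      acc + 2          -- fragments += 1
    else if ¬ ((PySem.List.slice words none (some 10)).any (fun word =>
        PySem.Str.endswith word "ed" || PySem.Str.endswith word "ing" ||
        PySem.Str.endswith word "s" || PySem.Str.endswith word "es" ||
        ["is", "are", "was", "were", "has", "have", "do", "does"].contains word)) then
      acc + 1          -- fragments += 0.5
    else acc) 0
  PySem.Int.floordiv fragments2 2

-- ===== PORT B =====
def pvIsShort (sentence : String) : Bool :=
  (PySem.Str.split₀ sentence).length < 3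

def pvLacksVerb (sentence : String) : Bool :=
  let words := PySem.Str.split₀ sentence
  3 ≤ words.length && !((PySem.List.slice words none (some 10)).any (fun word =>
    PySem.Str.endswith word "ed" || PySem.Str.endswith word "ing" ||
    PySem.Str.endswith word "s" || PySem.Str.endswith word "es" ||
    ["is", "are", "was", "were", "has", "have", "do", "does"].contains word))

def detect_sentence_fragments_py_alt (sentences : List String) : Int :=
  let short : Int := sentences.countP pvIsShort
  let half : Int := sentences.countP pvLacksVerb
  short + PySem.Int.floordiv half 2

-- ===== PRECONDITION & SPEC =====
def Spec_detect_sentence_fragments_py (sentences : List String) (out : Int) : Prop := out = detect_sentence_fragments_py_alt sentences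
instance (sentences : List String) (out : Int) : Decidable (Spec_detect_sentence_fragments_py sentences out) := by unfold Spec_detect_sentence_fragments_py; infer_instance

-- ===== CLAIM (what is proved, stated in full; the proofs are below) =====
def Claim_equal_detect_sentence_fragments_py : Prop := ∀ (sentences : List String), Dom_detect_sentence_fragments_py sentences → Spec_detect_sentence_fragments_py sentences (detect_sentence_fragments_py sentences)

-- ===== LEMMAS AND PROOFS =====

-- one step of A's loop, in half-units, over an abstract word count n and verb test b
theorem pv_point (n : Nat) (b : Bool) (acc : Int) :
    (if n < 3 then acc + 2 else if ¬ (b = true) then acc + 1 else acc)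
    = acc + 2 * (if decide (n < 3) = true then 1 else 0)
          + (if (decide (3 ≤ n) && !b) = true then 1 else 0) := by
  split_ifs <;> simp_all <;> omega

-- A's loop state in half-units equals 2·(count of short sentences) + (count of verb-lacking sentences).
theorem pv_foldl_eq_counts (sentences : List String) (acc : Int) :
    sentences.foldl (fun acc sentence =>
      let words := PySem.Str.split₀ sentence
      if words.length < 3 then acc + 2
      else if ¬ ((PySem.List.slice words none (some 10)).any (fun word =>
          PySem.Str.endswith word "ed" || PySem.Str.endswith word "ing" ||
          PySem.Str.endswith word "s" || PySem.Str.endswith word "es" ||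
          ["is", "are", "was", "were", "has", "have", "do", "does"].contains word)) then acc + 1
      else acc) acc
    = acc + 2 * (sentences.countP pvIsShort : Int) + (sentences.countP pvLacksVerb : Int) := by
  induction sentences generalizing acc with
  | nil => simp
  | cons s rest ih =>
    rw [List.foldl_cons, ih, List.countP_cons, List.countP_cons]
    beta_reduce
    simp only [pvIsShort, pvLacksVerb]
    rw [pv_point]
    push_cast
    ring

-- ===== VERDICT (by name: the statement is the Claim_ definition above) =====
theorem detect_sentence_fragments_py_spec : Claim_equal_detect_sentence_fragments_py := by
  intro sentences _
  unfold Spec_detect_sentence_fragments_py detect_sentence_fragments_py detect_sentence_fragments_py_alt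
  rw [pv_foldl_eq_counts]
  simp only [PySem.Int.floordiv_eq_ediv_of_pos (by norm_num : (0:Int) < 2)]
  omega
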